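-- pv_equiv track=rewrite | github.com/ykghani/advent-of-code-21 | d3/d3.py | bit_criteria
-- ===== SOURCE A (Python) =====
-- def bit_criteria(bits: list, idx: int, oxy_gen=True) -> list:
--     if len(bits) == 1:
--         return bits
--
--     ones = sum(1 for bit in bits if bit[idx] == '1')
--     zeros = len(bits) - ones
--
--     if oxy_gen:
--         keep_bit = '1' if ones >= zeros else '0'
--     else:
--         keep_bit = '0' if zeros <= ones else '1'
--
--     return [bit for bit in bits if bit[idx] == keep_bit]
-- ===== SOURCE B (Python) =====
-- def bit_criteria(bits: list, idx: int, oxy_gen=True) -> list: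
--     if len(bits) == 1:
--         return bits
--     group1, group0 = [], []
--     for bit in bits:
--         if bit[idx] == '1':
--             group1.append(bit)
--         elif bit[idx] == '0':
--             group0.append(bit)
--     ones = len(group1)
--     zeros = len(bits) - ones
--     if oxy_gen:
--         return group1 if ones >= zeros else group0
--     return group0 if ones >= zeros else group1
-- ===== Notes on version B (the rewrite author's own statement) =====
-- stated objective: alternative
-- what changed: Single partitioning pass that builds both candidate groups at once and returns one of them by the criteria decision, instead of a counting pass followed by a second filtering pass with a computed keep character.
import Mathlib
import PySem

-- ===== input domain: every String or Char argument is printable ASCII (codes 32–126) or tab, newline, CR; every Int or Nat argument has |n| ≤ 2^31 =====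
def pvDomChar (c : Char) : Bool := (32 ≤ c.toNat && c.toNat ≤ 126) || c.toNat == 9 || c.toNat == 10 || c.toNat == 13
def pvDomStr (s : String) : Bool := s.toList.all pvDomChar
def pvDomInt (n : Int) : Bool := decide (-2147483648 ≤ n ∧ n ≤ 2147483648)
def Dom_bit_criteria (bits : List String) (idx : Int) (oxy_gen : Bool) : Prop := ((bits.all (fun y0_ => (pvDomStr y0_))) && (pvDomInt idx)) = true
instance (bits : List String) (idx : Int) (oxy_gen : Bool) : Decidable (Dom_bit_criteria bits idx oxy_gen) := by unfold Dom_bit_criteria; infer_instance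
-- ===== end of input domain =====

-- B replaces A's count-then-refilter two-pass with a single partitioning pass that builds both candidate groups and returns one of them (alternative decomposition, same cost).


-- ===== PORT A =====
def bit_criteria (bits : List String) (idx : Int) (oxy_gen : Bool) : List String :=
  if bits.length == 1 then bits
  else
    let ones : Int := bits.foldl (fun acc bit => if PySem.Str.pyGet? bit idx == some '1' then acc + 1 else acc) 0
    let zeros : Int := (bits.length : Int) - ones
    let keep_bit : Char :=
      if oxy_gen then (if ones ≥ zeros then '1' else '0')
      else (if zeros ≤ ones then '0' else '1')
    bits.filter (fun bit => PySem.Str.pyGet? bit idx == some keep_bit)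

-- ===== PORT B =====
def bit_criteria_alt (bits : List String) (idx : Int) (oxy_gen : Bool) : List String :=
  if bits.length == 1 then bits
  else
    let gs : List String × List String :=
      bits.foldl (fun acc bit =>
        if PySem.Str.pyGet? bit idx == some '1' then (acc.1 ++ [bit], acc.2)
        else if PySem.Str.pyGet? bit idx == some '0' then (acc.1, acc.2 ++ [bit])
        else acc) ([], [])
    let ones : Int := gs.1.length
    let zeros : Int := (bits.length : Int) - ones
    if oxy_gen then (if ones ≥ zeros then gs.1 else gs.2)
    else (if ones ≥ zeros then gs.2 else gs.1)

-- ===== PRECONDITION & SPEC =====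
-- Pre_ excludes exactly the inputs where Python A raises IndexError: when the
-- single-element early return is not taken, idx must be a valid Python index
-- into every string of bits.
def Pre_bit_criteria (bits : List String) (idx : Int) (oxy_gen : Bool) : Prop :=
  bits.length = 1 ∨ ∀ s ∈ bits, PySem.Raise.InRange s.toList.length idx
instance (bits : List String) (idx : Int) (oxy_gen : Bool) : Decidable (Pre_bit_criteria bits idx oxy_gen) := by unfold Pre_bit_criteria; infer_instance

def pvWitness_bit_criteria : List String × Int × Bool := (["10", "01", "11"], 0, true)

def Spec_bit_criteria (bits : List String) (idx : Int) (oxy_gen : Bool) (out : List String) : Prop := out = bit_criteria_alt bits idx oxy_gen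
instance (bits : List String) (idx : Int) (oxy_gen : Bool) (out : List String) : Decidable (Spec_bit_criteria bits idx oxy_gen out) := by unfold Spec_bit_criteria; infer_instance

-- ===== CLAIM (what is proved, stated in full; the proofs are below) =====
def Claim_equal_bit_criteria : Prop := ∀ (bits : List String) (idx : Int) (oxy_gen : Bool), Dom_bit_criteria bits idx oxy_gen → Pre_bit_criteria bits idx oxy_gen → Spec_bit_criteria bits idx oxy_gen (bit_criteria bits idx oxy_gen)

-- ===== LEMMAS AND PROOFS =====

-- B's partitioning fold equals two filters (the '1' test shadows the '0' test, so the elif bucket is exactly the '0' filter).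
theorem pv_fold_partition (idx : Int) (l : List String) (a1 a0 : List String) :
    l.foldl (fun (acc : List String × List String) bit =>
        if PySem.Str.pyGet? bit idx == some '1' then (acc.1 ++ [bit], acc.2)
        else if PySem.Str.pyGet? bit idx == some '0' then (acc.1, acc.2 ++ [bit])
        else acc) (a1, a0)
    = (a1 ++ l.filter (fun bit => PySem.Str.pyGet? bit idx == some '1'),
       a0 ++ l.filter (fun bit => PySem.Str.pyGet? bit idx == some '0')) := by
  induction l generalizing a1 a0 with
  | nil => simp
  | cons b tl ih =>
    by_cases h1 : PySem.List.pyGet? b.toList idx = some '1'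
    · have h0 : ¬ PySem.List.pyGet? b.toList idx = some '0' := by simp [h1]
      simpa [h1, h0] using ih (a1 ++ [b]) a0
    · by_cases h0 : PySem.List.pyGet? b.toList idx = some '0'
      · simpa [h1, h0] using ih a1 (a0 ++ [b])
      · simpa [h1, h0] using ih a1 a0

-- A's counting fold equals the length of the corresponding filter.
theorem pv_fold_count (p : String → Bool) (l : List String) (c : Int) :
    l.foldl (fun acc bit => if p bit then acc + 1 else acc) c
    = c + ((l.filter p).length : Int) := by
  induction l generalizing c with
  | nil => simp
  | cons b tl ih =>
    by_cases h : p b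
    · simp [List.foldl_cons, h, ih]; ring
    · simp [List.foldl_cons, h, ih]

-- ===== VERDICT (by name: the statement is the Claim_ definition above) =====
theorem bit_criteria_spec : Claim_equal_bit_criteria := by
  intro bits idx oxy_gen _ _
  unfold Spec_bit_criteria bit_criteria bit_criteria_alt
  by_cases hlen : bits.length == 1
  · simp [hlen]
  · simp only [hlen, if_false]  -- take the non-singleton branch of both ports
    rw [pv_fold_partition idx bits [] [],
        pv_fold_count (fun bit => PySem.Str.pyGet? bit idx == some '1') bits 0]
    simp only [List.nil_append, zero_add]
    rcases oxy_gen with _ | _ <;> simp only [Bool.false_eq_true, if_true, if_false] <;>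
      split_ifs <;> first | rfl | omega
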